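-- pv_equiv track=rewrite | github.com/ax13111/Texas-Hold-em-Probability-Simulation | Hold'em_Probability_basic.py | has_twopair
-- ===== SOURCE A (Python) =====
-- def has_twopair(cards):
--     number=[]
--     check=[]
--     for c in cards:
--         number.append(c[-1])
--     for n in number:
--         check.append(number.count(n)) #I count the frequency of numbers appear in the combination and create a list named _check_ to store the frequency
--
--     if check.count(1)==3 and check.count(2)==4: #Check the frequency. Logically, since we consider public cards and hands(5+2=7cards), so if we have two pairs then the frequency will be 1,1,1,2,2,2,2
--         return True
--     return False
-- ===== SOURCE B (Python) =====
-- def has_twopair(cards):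
--     counts = {}
--     for c in cards:
--         r = c[-1]
--         counts[r] = counts.get(r, 0) + 1
--     vals = list(counts.values())
--     return vals.count(1) == 3 and vals.count(2) == 2
-- ===== Notes on version B (the rewrite author's own statement) =====
-- stated objective: faster
-- what changed: B builds a rank-frequency dictionary in one pass and counts how many distinct ranks occur once (3) and twice (2), instead of A's per-card list.count rescans over the whole rank list.
import Mathlib
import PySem

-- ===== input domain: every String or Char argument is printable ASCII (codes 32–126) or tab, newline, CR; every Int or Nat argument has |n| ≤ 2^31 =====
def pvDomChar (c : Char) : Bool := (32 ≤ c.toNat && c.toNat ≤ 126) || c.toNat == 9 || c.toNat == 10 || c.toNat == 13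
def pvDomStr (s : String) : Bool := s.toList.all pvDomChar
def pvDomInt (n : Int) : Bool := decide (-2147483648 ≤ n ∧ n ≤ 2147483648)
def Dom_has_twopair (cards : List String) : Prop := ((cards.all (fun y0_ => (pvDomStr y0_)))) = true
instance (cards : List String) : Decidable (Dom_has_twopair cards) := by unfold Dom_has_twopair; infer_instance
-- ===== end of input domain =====

-- B replaces A's quadratic per-card list.count rescans by a one-pass frequency dictionary whose values are then counted.

-- ===== PORT A =====
-- c[-1]; Pre_ excludes the empty string, where Python raises IndexError, so the .getD default is never reached inside Pre_.
def pvLastChar (c : String) : Char := (PySem.Str.pyGet? c (-1)).getD ' '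

def has_twopair (cards : List String) : Bool :=
  let number : List Char := cards.foldl (fun acc c => acc ++ [pvLastChar c]) []
  let check : List Int := number.foldl (fun acc n => acc ++ [(number.count n : Int)]) []
  if check.count 1 == 3 && check.count 2 == 4 then true else false

-- ===== PORT B =====
def has_twopair_alt (cards : List String) : Bool :=
  let counts : PySem.Dict Char Int :=
    cards.foldl (fun d c => d.insert (pvLastChar c) (d.getD (pvLastChar c) 0 + 1)) PySem.Dict.empty
  let vals : List Int := counts.values
  vals.count 1 == 3 && vals.count 2 == 2

-- ===== PRECONDITION & SPEC =====
-- Pre_ excludes lists containing an empty string: Python A (and B) raise IndexError on c[-1] there.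
def Pre_has_twopair (cards : List String) : Prop := ∀ c ∈ cards, c ≠ ""
instance (cards : List String) : Decidable (Pre_has_twopair cards) := by unfold Pre_has_twopair; infer_instance
def pvWitness_has_twopair : List String := ["2H", "2S", "3D", "3C", "4H", "5S", "6D"]
def Spec_has_twopair (cards : List String) (out : Bool) : Prop := out = has_twopair_alt cards
instance (cards : List String) (out : Bool) : Decidable (Spec_has_twopair cards out) := by unfold Spec_has_twopair; infer_instance

-- ===== CLAIM (what is proved, stated in full; the proofs are below) =====
def Claim_equal_has_twopair : Prop := ∀ (cards : List String), Dom_has_twopair cards → Pre_has_twopair cards → Spec_has_twopair cards (has_twopair cards)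

-- ===== LEMMAS AND PROOFS =====

theorem foldl_append_singleton {α β : Type} (f : α → β) (l : List α) (acc : List β) :
    l.foldl (fun a c => a ++ [f c]) acc = acc ++ l.map f := by
  induction l generalizing acc with
  | nil => simp
  | cons x xs ih => simp [List.foldl, ih]

-- For k > 0: each rank with multiplicity k contributes k entries equal to k in A's `check` list,
-- and exactly one entry equal to k among the distinct ranks (d = any nodup list with l's members).
theorem count_map_count {α : Type} [DecidableEq α] (l d : List α) (hd : d.Nodup)
    (hmem : ∀ a, a ∈ d ↔ a ∈ l) (k : ℕ) :
    (l.map (fun n => l.count n)).count k = k * (d.map (fun n => l.count n)).count k := by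
  classical
  have hp : ∀ m : List α,
      (m.map (fun n => l.count n)).count k = m.countP (fun n => l.count n == k) := by
    intro m
    simp [List.count, List.countP_map, Function.comp_def]
  rw [hp l, hp d]
  have hfilter : ∀ m : List α, m.countP (fun n => l.count n == k) =
      (m.filter (fun n => l.count n == k)).length := by
    intro m; simp [List.countP_eq_length_filter]
  rw [hfilter l, hfilter d]
  have hlen : ∀ m : List α, m.length = ∑ a ∈ m.toFinset, m.count a := by
    intro m
    simpa using (Multiset.toFinset_sum_count_eq (m : Multiset α)).symm
  rw [hlen (l.filter (fun n => l.count n == k)),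
      hlen (d.filter (fun n => l.count n == k))]
  have hTF : (d.filter (fun n => l.count n == k)).toFinset
      = (l.filter (fun n => l.count n == k)).toFinset := by
    ext a; simp [hmem]
  rw [hTF]
  have h1 : ∀ a ∈ (l.filter (fun n => l.count n == k)).toFinset,
      (l.filter (fun n => l.count n == k)).count a = k := by
    intro a ha
    have hmemf := List.mem_toFinset.mp ha
    have hpa : (l.count a == k) = true := (List.mem_filter.mp hmemf).2
    have hcnt : l.count a = k := by simpa using hpa
    rw [List.count_filter]
    exact hcnt
    exact hpa
  have h2 : ∀ a ∈ (l.filter (fun n => l.count n == k)).toFinset,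
      (d.filter (fun n => l.count n == k)).count a = 1 := by
    intro a ha
    have hmemf := List.mem_toFinset.mp ha
    have hpa : (l.count a == k) = true := (List.mem_filter.mp hmemf).2
    have had : a ∈ d := (hmem a).mpr (List.mem_filter.mp hmemf).1
    rw [List.count_filter]
    exact List.count_eq_one_of_mem hd had
    exact hpa
  rw [Finset.sum_congr rfl h1, Finset.sum_congr rfl h2]
  simp [Finset.sum_const, mul_comm]

-- Int-valued version matching the ports' lists.
theorem count_map_intcast {α : Type} [DecidableEq α] (m l : List α) (k : ℕ) :
    (m.map (fun n => (l.count n : Int))).count (k : Int) = (m.map (fun n => l.count n)).count k := by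
  simp only [List.count, List.countP_map, Function.comp_def]
  apply List.countP_congr
  intro a _
  simp

theorem foldl_comp {α β γ : Type} (f : β → γ) (g : α → γ → α) (l : List β) (init : α) :
    l.foldl (fun a b => g a (f b)) init = (l.map f).foldl g init := by
  induction l generalizing init with
  | nil => rfl
  | cons x xs ih => simp [List.foldl, ih]

theorem has_twopair_eq (cards : List String) : has_twopair cards = has_twopair_alt cards := by
  classical
  unfold has_twopair has_twopair_alt
  set ranks : List Char := cards.map pvLastChar with hranks
  have hnum : cards.foldl (fun acc c => acc ++ [pvLastChar c]) [] = ranks := by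
    simpa using foldl_append_singleton pvLastChar cards []
  have hchk : ∀ (num : List Char),
      num.foldl (fun acc n => acc ++ [((num.count n : Int))]) []
        = num.map (fun n => (num.count n : Int)) := by
    intro num; simpa using foldl_append_singleton (fun n => (num.count n : Int)) num []
  have hcounter : cards.foldl
        (fun d c => d.insert (pvLastChar c) (d.getD (pvLastChar c) 0 + 1)) PySem.Dict.empty
      = PySem.Dict.counter ranks :=
    (foldl_comp pvLastChar (fun (d : PySem.Dict Char Int) x => d.insert x (d.getD x 0 + 1))
        cards PySem.Dict.empty).trans
      (PySem.Dict.foldl_insert_getD_add_one_eq_counter _)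
  simp only [hnum, hchk, hcounter]
  have hvals : (PySem.Dict.counter ranks).values
      = (PySem.List.dedup ranks).map (fun n => (ranks.count n : Int)) := by
    have hitems := PySem.Dict.items_counter (xs := ranks)
    have hv : (PySem.Dict.counter ranks).values = (PySem.Dict.counter ranks).items.map (·.2) := rfl
    rw [hv, hitems]
    simp [← PySem.List.dedup_eq_ofList, List.map_map, Function.comp_def]
  rw [hvals]
  rw [show (1 : Int) = ((1 : ℕ) : Int) by norm_num, show (2 : Int) = ((2 : ℕ) : Int) by norm_num]
  rw [count_map_intcast ranks ranks 1, count_map_intcast ranks ranks 2,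
      count_map_intcast (PySem.List.dedup ranks) ranks 1,
      count_map_intcast (PySem.List.dedup ranks) ranks 2]
  have hd := PySem.List.nodup_dedup (xs := ranks)
  have hm : ∀ a, a ∈ PySem.List.dedup ranks ↔ a ∈ ranks := fun a => PySem.List.mem_dedup ranks a
  rw [count_map_count ranks (PySem.List.dedup ranks) hd hm 1,
      count_map_count ranks (PySem.List.dedup ranks) hd hm 2]
  set c1 := ((PySem.List.dedup ranks).map (fun n => ranks.count n)).count 1 with hc1
  set c2 := ((PySem.List.dedup ranks).map (fun n => ranks.count n)).count 2 with hc2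
  have hbe : (1 * c1 == 3 && 2 * c2 == 4) = (c1 == 3 && c2 == 2) := by
    have hiff : ((1 * c1 == 3 && 2 * c2 == 4) = true) ↔ ((c1 == 3 && c2 == 2) = true) := by
      simp only [Bool.and_eq_true, beq_iff_eq]
      omega
    exact Bool.eq_iff_iff.mpr hiff
  rw [hbe]
  cases (c1 == 3 && c2 == 2) <;> simp

-- ===== VERDICT (by name: the statement is the Claim_ definition above) =====
theorem has_twopair_spec : Claim_equal_has_twopair := by
  intro cards _ _
  unfold Spec_has_twopair
  exact has_twopair_eq cards
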